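-- pv_equiv track=rewrite | github.com/Alles59/Meeting_Analyse | Test/Voicereport.py | parse_voice_report
-- ===== SOURCE A (Python) =====
-- def parse_voice_report(report):
--     lines = report.split('\n')
--     parsed_report = {
--         "Pitch": {},
--         "Pulses": {},
--         "Voicing": {},
--         "Jitter": {},
--         "Shimmer": {},
--         "Harmonicity": {}
--     }
--     current_section = None
--
--     for line in lines:
--         if line.startswith("Pitch:"):
--             current_section = "Pitch"
--         elif line.startswith("Pulses:"):
--             current_section = "Pulses"
--         elif line.startswith("Voicing:"):
--             current_section = "Voicing"
--         elif line.startswith("Jitter:"):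
--             current_section = "Jitter"
--         elif line.startswith("Shimmer:"):
--             current_section = "Shimmer"
--         elif line.startswith("Harmonicity of the voiced parts only:"):
--             current_section = "Harmonicity"
--         elif current_section and line.strip():
--             key, value = line.split(':', 1)
--             parsed_report[current_section][key.strip()] = value.strip()
--
--     return parsed_report
-- ===== SOURCE B (Python) =====
-- SECTIONS = [("Pitch:", "Pitch"), ("Pulses:", "Pulses"), ("Voicing:", "Voicing"),
--             ("Jitter:", "Jitter"), ("Shimmer:", "Shimmer"),
--             ("Harmonicity of the voiced parts only:", "Harmonicity")]
--
--
-- def parse_voice_report(report):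
--     # Phase 1: group the lines under their section headers.
--     bodies = {name: [] for _, name in SECTIONS}
--     current = None
--     for line in report.split('\n'):
--         for prefix, name in SECTIONS:
--             if line.startswith(prefix):
--                 current = name
--                 break
--         else:
--             if current is not None:
--                 bodies[current].append(line)
--     # Phase 2: parse each section's collected body lines.
--     result = {}
--     for _, name in SECTIONS:
--         section = {}
--         for line in bodies[name]:
--             if line.strip():
--                 key, value = line.split(':', 1)
--                 section[key.strip()] = value.strip()
--         result[name] = section
--     return result
-- ===== Notes on version B (the rewrite author's own statement) =====
-- stated objective: alternative
-- what changed: A parses every body line inline in one interleaved pass that mutates the current section's dict; B first groups the lines into per-section body lists (phase 1) and then parses each section's collected lines into its dict (phase 2).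
import Mathlib
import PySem

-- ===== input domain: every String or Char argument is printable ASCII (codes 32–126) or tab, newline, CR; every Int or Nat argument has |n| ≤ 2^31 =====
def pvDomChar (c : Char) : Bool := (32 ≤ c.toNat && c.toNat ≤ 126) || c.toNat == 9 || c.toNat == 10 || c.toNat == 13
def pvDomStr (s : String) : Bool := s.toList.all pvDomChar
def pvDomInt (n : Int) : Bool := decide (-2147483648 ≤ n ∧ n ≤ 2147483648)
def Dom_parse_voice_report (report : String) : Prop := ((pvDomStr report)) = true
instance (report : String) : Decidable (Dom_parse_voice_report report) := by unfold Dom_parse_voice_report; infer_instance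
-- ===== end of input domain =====

-- B re-implements A's single interleaved parsing pass as group-then-parse (collect body
-- lines per section first, then parse each section); equivalence of RETURN values proved below.

-- ===== PORT A =====
-- A's loop body: the if/elif header chain, else parse the line into the current section's dict.
-- On a nonblank body line with no colon Python raises ValueError (the '| _ => st' arm); Pre_ excludes those inputs.
def pvStepA (st : PySem.Dict String (PySem.Dict String String) × Option String) (line : String) :
    PySem.Dict String (PySem.Dict String String) × Option String :=
  if PySem.Str.startswith line "Pitch:" then (st.1, some "Pitch")
  else if PySem.Str.startswith line "Pulses:" then (st.1, some "Pulses")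
  else if PySem.Str.startswith line "Voicing:" then (st.1, some "Voicing")
  else if PySem.Str.startswith line "Jitter:" then (st.1, some "Jitter")
  else if PySem.Str.startswith line "Shimmer:" then (st.1, some "Shimmer")
  else if PySem.Str.startswith line "Harmonicity of the voiced parts only:" then (st.1, some "Harmonicity")
  else match st.2 with
    | none => st
    | some sec =>
      if PySem.Str.strip line ≠ "" then
        match (PySem.Str.splitMax? line ":" 1).getD [] with
        | [k, v] => (st.1.modify sec PySem.Dict.empty
            (fun d => d.insert (PySem.Str.strip k) (PySem.Str.strip v)), st.2)
        | _ => st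
      else st

def parse_voice_report (report : String) : List (String × List (String × String)) :=
  let lines := (PySem.Str.split? report "\n").getD []
  let init : PySem.Dict String (PySem.Dict String String) :=
    PySem.Dict.ofList [("Pitch", PySem.Dict.empty), ("Pulses", PySem.Dict.empty),
      ("Voicing", PySem.Dict.empty), ("Jitter", PySem.Dict.empty),
      ("Shimmer", PySem.Dict.empty), ("Harmonicity", PySem.Dict.empty)]
  let fin := lines.foldl pvStepA (init, none)
  fin.1.items.map (fun p => (p.1, p.2.items))

-- ===== PORT B =====
def pvSections : List (String × String) :=
  [("Pitch:", "Pitch"), ("Pulses:", "Pulses"), ("Voicing:", "Voicing"),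
   ("Jitter:", "Jitter"), ("Shimmer:", "Shimmer"),
   ("Harmonicity of the voiced parts only:", "Harmonicity")]

-- inner 'for prefix, name in SECTIONS: if line.startswith(prefix): … break / else: …'
def pvHeaderName (line : String) : Option String :=
  (pvSections.find? (fun p => PySem.Str.startswith line p.1)).map (fun p => p.2)

-- phase 1 loop body: record the section, or append the line to the current section's body list
def pvStepB (st : PySem.Dict String (List String) × Option String) (line : String) :
    PySem.Dict String (List String) × Option String :=
  match pvHeaderName line with
  | some name => (st.1, some name)
  | none =>
    match st.2 with
    | some cur => (st.1.modify cur [] (fun b => b ++ [line]), st.2)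
    | none => st

-- phase 2 inner loop: parse one section's collected body lines
def pvParseSection (body : List String) : PySem.Dict String String :=
  body.foldl (fun sec line =>
    if PySem.Str.strip line ≠ "" then
      match (PySem.Str.splitMax? line ":" 1).getD [] with
      | [k, v] => sec.insert (PySem.Str.strip k) (PySem.Str.strip v)
      | _ => sec
    else sec) PySem.Dict.empty

def parse_voice_report_alt (report : String) : List (String × List (String × String)) :=
  let bodies := ((PySem.Str.split? report "\n").getD []).foldl pvStepB
    (PySem.Dict.ofList (pvSections.map (fun p => (p.2, ([] : List String)))), none)
  pvSections.map (fun p => (p.2, (pvParseSection (bodies.1.getD p.2 [])).items))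

-- ===== PRECONDITION & SPEC =====
def pvIsHeader (line : String) : Bool :=
  PySem.Str.startswith line "Pitch:" || PySem.Str.startswith line "Pulses:" ||
  PySem.Str.startswith line "Voicing:" || PySem.Str.startswith line "Jitter:" ||
  PySem.Str.startswith line "Shimmer:" ||
  PySem.Str.startswith line "Harmonicity of the voiced parts only:"

-- Pre_ excludes exactly the inputs on which A raises ValueError: a nonblank, non-header line
-- that follows some header line but contains no colon separator, so the split-unpack fails.
def Pre_parse_voice_report (report : String) : Prop :=
  ∀ i, i < ((PySem.Str.split? report "\n").getD []).length →
    (pvIsHeader (((PySem.Str.split? report "\n").getD [])[i]!) = false ∧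
     PySem.Str.strip (((PySem.Str.split? report "\n").getD [])[i]!) ≠ "" ∧
     (∃ j, j < i ∧ pvIsHeader (((PySem.Str.split? report "\n").getD [])[j]!) = true)) →
    PySem.Str.isIn ":" (((PySem.Str.split? report "\n").getD [])[i]!) = true

instance (report : String) : Decidable (Pre_parse_voice_report report) := by
  unfold Pre_parse_voice_report; infer_instance

def pvWitness_parse_voice_report : String := "Pitch:\n  mean: 5 Hz\n\nJitter:\n  local: 1"

def Spec_parse_voice_report (report : String) (out : List (String × List (String × String))) : Prop :=
  out = parse_voice_report_alt report
instance (report : String) (out : List (String × List (String × String))) :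
    Decidable (Spec_parse_voice_report report out) := by unfold Spec_parse_voice_report; infer_instance

-- ===== CLAIM (what is proved, stated in full; the proofs are below) =====
def Claim_equal_parse_voice_report : Prop := ∀ (report : String), Dom_parse_voice_report report →
  Pre_parse_voice_report report → Spec_parse_voice_report report (parse_voice_report report)

-- ===== LEMMAS AND PROOFS =====

-- six-slot dict shape both folds preserve
def pvMk6 {α : Type} (x1 x2 x3 x4 x5 x6 : α) : PySem.Dict String α :=
  PySem.Dict.mk [("Pitch", x1), ("Pulses", x2), ("Voicing", x3),
    ("Jitter", x4), ("Shimmer", x5), ("Harmonicity", x6)]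

theorem pvModify1 {α : Type} (x1 x2 x3 x4 x5 x6 d : α) (f : α → α) :
    (pvMk6 x1 x2 x3 x4 x5 x6).modify "Pitch" d f = pvMk6 (f x1) x2 x3 x4 x5 x6 := rfl
theorem pvModify2 {α : Type} (x1 x2 x3 x4 x5 x6 d : α) (f : α → α) :
    (pvMk6 x1 x2 x3 x4 x5 x6).modify "Pulses" d f = pvMk6 x1 (f x2) x3 x4 x5 x6 := rfl
theorem pvModify3 {α : Type} (x1 x2 x3 x4 x5 x6 d : α) (f : α → α) :
    (pvMk6 x1 x2 x3 x4 x5 x6).modify "Voicing" d f = pvMk6 x1 x2 (f x3) x4 x5 x6 := rfl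
theorem pvModify4 {α : Type} (x1 x2 x3 x4 x5 x6 d : α) (f : α → α) :
    (pvMk6 x1 x2 x3 x4 x5 x6).modify "Jitter" d f = pvMk6 x1 x2 x3 (f x4) x5 x6 := rfl
theorem pvModify5 {α : Type} (x1 x2 x3 x4 x5 x6 d : α) (f : α → α) :
    (pvMk6 x1 x2 x3 x4 x5 x6).modify "Shimmer" d f = pvMk6 x1 x2 x3 x4 (f x5) x6 := rfl
theorem pvModify6 {α : Type} (x1 x2 x3 x4 x5 x6 d : α) (f : α → α) :
    (pvMk6 x1 x2 x3 x4 x5 x6).modify "Harmonicity" d f = pvMk6 x1 x2 x3 x4 x5 (f x6) := rfl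

def pvCurOK (cur : Option String) : Prop :=
  cur = none ∨ cur = some "Pitch" ∨ cur = some "Pulses" ∨ cur = some "Voicing" ∨
  cur = some "Jitter" ∨ cur = some "Shimmer" ∨ cur = some "Harmonicity"

theorem pvParseSection_append (b : List String) (l : String) :
    pvParseSection (b ++ [l]) =
      (if PySem.Str.strip l ≠ "" then
        match (PySem.Str.splitMax? l ":" 1).getD [] with
        | [k, v] => (pvParseSection b).insert (PySem.Str.strip k) (PySem.Str.strip v)
        | _ => pvParseSection b
      else pvParseSection b) := by
  simp [pvParseSection, List.foldl_append]

theorem pvStep_pair (l : String) (b1 b2 b3 b4 b5 b6 : List String) (cur : Option String)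
    (hcur : pvCurOK cur) :
    ∃ c1 c2 c3 c4 c5 c6 cur',
      pvStepB (pvMk6 b1 b2 b3 b4 b5 b6, cur) l = (pvMk6 c1 c2 c3 c4 c5 c6, cur') ∧
      pvStepA (pvMk6 (pvParseSection b1) (pvParseSection b2) (pvParseSection b3)
          (pvParseSection b4) (pvParseSection b5) (pvParseSection b6), cur) l
        = (pvMk6 (pvParseSection c1) (pvParseSection c2) (pvParseSection c3)
            (pvParseSection c4) (pvParseSection c5) (pvParseSection c6), cur') ∧
      pvCurOK cur' := by
  by_cases h1 : PySem.Str.startswith l "Pitch:" = true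
  · exact ⟨b1, b2, b3, b4, b5, b6, some "Pitch", by
      simp_all [pvStepB, pvHeaderName, pvSections], by
      simp_all [pvStepA], by simp [pvCurOK]⟩
  · by_cases h2 : PySem.Str.startswith l "Pulses:" = true
    · exact ⟨b1, b2, b3, b4, b5, b6, some "Pulses", by
        simp_all [pvStepB, pvHeaderName, pvSections], by
        simp_all [pvStepA], by simp [pvCurOK]⟩
    · by_cases h3 : PySem.Str.startswith l "Voicing:" = true
      · exact ⟨b1, b2, b3, b4, b5, b6, some "Voicing", by
          simp_all [pvStepB, pvHeaderName, pvSections], by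
          simp_all [pvStepA], by simp [pvCurOK]⟩
      · by_cases h4 : PySem.Str.startswith l "Jitter:" = true
        · exact ⟨b1, b2, b3, b4, b5, b6, some "Jitter", by
            simp_all [pvStepB, pvHeaderName, pvSections], by
            simp_all [pvStepA], by simp [pvCurOK]⟩
        · by_cases h5 : PySem.Str.startswith l "Shimmer:" = true
          · exact ⟨b1, b2, b3, b4, b5, b6, some "Shimmer", by
              simp_all [pvStepB, pvHeaderName, pvSections], by
              simp_all [pvStepA], by simp [pvCurOK]⟩
          · by_cases h6 : PySem.Str.startswith l "Harmonicity of the voiced parts only:" = true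
            · exact ⟨b1, b2, b3, b4, b5, b6, some "Harmonicity", by
                simp_all [pvStepB, pvHeaderName, pvSections], by
                simp_all [pvStepA], by simp [pvCurOK]⟩
            · -- not a header line
              rcases hcur with h | h | h | h | h | h | h
              all_goals subst h
              · exact ⟨b1, b2, b3, b4, b5, b6, none, by
                  simp_all [pvStepB, pvHeaderName, pvSections], by
                  simp_all [pvStepA], Or.inl rfl⟩
              · exact ⟨b1 ++ [l], b2, b3, b4, b5, b6, some "Pitch", by
                  simp_all [pvStepB, pvHeaderName, pvSections, List.find?, pvModify1], by
                  simp_all [pvStepA, pvParseSection_append, pvModify1]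
                  split <;> try rfl
                  split <;> rfl, by simp [pvCurOK]⟩
              · exact ⟨b1, b2 ++ [l], b3, b4, b5, b6, some "Pulses", by
                  simp_all [pvStepB, pvHeaderName, pvSections, List.find?, pvModify2], by
                  simp_all [pvStepA, pvParseSection_append, pvModify2]
                  split <;> try rfl
                  split <;> rfl, by simp [pvCurOK]⟩
              · exact ⟨b1, b2, b3 ++ [l], b4, b5, b6, some "Voicing", by
                  simp_all [pvStepB, pvHeaderName, pvSections, List.find?, pvModify3], by
                  simp_all [pvStepA, pvParseSection_append, pvModify3]
                  split <;> try rfl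
                  split <;> rfl, by simp [pvCurOK]⟩
              · exact ⟨b1, b2, b3, b4 ++ [l], b5, b6, some "Jitter", by
                  simp_all [pvStepB, pvHeaderName, pvSections, List.find?, pvModify4], by
                  simp_all [pvStepA, pvParseSection_append, pvModify4]
                  split <;> try rfl
                  split <;> rfl, by simp [pvCurOK]⟩
              · exact ⟨b1, b2, b3, b4, b5 ++ [l], b6, some "Shimmer", by
                  simp_all [pvStepB, pvHeaderName, pvSections, List.find?, pvModify5], by
                  simp_all [pvStepA, pvParseSection_append, pvModify5]
                  split <;> try rfl
                  split <;> rfl, by simp [pvCurOK]⟩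
              · exact ⟨b1, b2, b3, b4, b5, b6 ++ [l], some "Harmonicity", by
                  simp_all [pvStepB, pvHeaderName, pvSections, List.find?, pvModify6], by
                  simp_all [pvStepA, pvParseSection_append, pvModify6]
                  split <;> try rfl
                  split <;> rfl, by simp [pvCurOK]⟩

theorem pvFold_pair (ls : List String) : ∀ (b1 b2 b3 b4 b5 b6 : List String) (cur : Option String),
    pvCurOK cur →
    ∃ c1 c2 c3 c4 c5 c6 cur',
      ls.foldl pvStepB (pvMk6 b1 b2 b3 b4 b5 b6, cur) = (pvMk6 c1 c2 c3 c4 c5 c6, cur') ∧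
      ls.foldl pvStepA (pvMk6 (pvParseSection b1) (pvParseSection b2) (pvParseSection b3)
          (pvParseSection b4) (pvParseSection b5) (pvParseSection b6), cur)
        = (pvMk6 (pvParseSection c1) (pvParseSection c2) (pvParseSection c3)
            (pvParseSection c4) (pvParseSection c5) (pvParseSection c6), cur') := by
  induction ls with
  | nil => intro b1 b2 b3 b4 b5 b6 cur _; exact ⟨b1, b2, b3, b4, b5, b6, cur, rfl, rfl⟩
  | cons l ls ih =>
    intro b1 b2 b3 b4 b5 b6 cur hcur
    obtain ⟨c1, c2, c3, c4, c5, c6, cur', hB, hA, hok⟩ := pvStep_pair l b1 b2 b3 b4 b5 b6 cur hcur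
    obtain ⟨d1, d2, d3, d4, d5, d6, cur'', hB2, hA2⟩ := ih c1 c2 c3 c4 c5 c6 cur' hok
    exact ⟨d1, d2, d3, d4, d5, d6, cur'', by simp [hB, hB2], by simp [hA, hA2]⟩

-- ===== VERDICT (by name: the statement is the Claim_ definition above) =====
theorem parse_voice_report_spec : Claim_equal_parse_voice_report := by
  intro report _ _
  unfold Spec_parse_voice_report parse_voice_report parse_voice_report_alt
  dsimp only
  obtain ⟨c1, c2, c3, c4, c5, c6, cur', hB, hA⟩ :=
    pvFold_pair ((PySem.Str.split? report "\n").getD []) [] [] [] [] [] [] none (Or.inl rfl)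
  have hinit : pvParseSection [] = PySem.Dict.empty := rfl
  rw [show (PySem.Dict.ofList [("Pitch", (PySem.Dict.empty : PySem.Dict String String)),
      ("Pulses", PySem.Dict.empty), ("Voicing", PySem.Dict.empty), ("Jitter", PySem.Dict.empty),
      ("Shimmer", PySem.Dict.empty), ("Harmonicity", PySem.Dict.empty)])
    = pvMk6 (pvParseSection []) (pvParseSection []) (pvParseSection [])
        (pvParseSection []) (pvParseSection []) (pvParseSection []) from rfl]
  rw [show PySem.Dict.ofList (pvSections.map (fun p => (p.2, ([] : List String))))
    = pvMk6 [] [] [] [] [] [] from rfl]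
  rw [hA, hB]
  simp [pvSections, pvMk6, PySem.Dict.getD, PySem.Dict.get?]
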